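-- pv_equiv track=rewrite | github.com/ttzytt/PyAutoGrade | tests/Block 4/tested_code/obfuscated_tested_codes [copied at 2024-04-22 10#59#52.136339]/1159/file_reading.py | count_long_lines
-- ===== SOURCE A (Python) =====
-- def count_long_lines(read_file, min_length):
--     long_lines = 0
--     for line in read_file:
--         characters_in_line = 0
--         splited_line = line.split()
--         for n in range(len(splited_line)):
--             word = splited_line[n]
--
--             for i in range(len(word)):
--                 if word[i] != ',' and word[i] != '.':
--                     characters_in_line += 1
--
--         if characters_in_line >= min_length:
--             long_lines += 1
--     return long_lines
-- ===== SOURCE B (Python) =====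
-- def count_long_lines(read_file, min_length):
--     long_lines = 0
--     for line in read_file:
--         s = "".join(line.split())
--         if len(s) - s.count(',') - s.count('.') >= min_length:
--             long_lines += 1
--     return long_lines
-- ===== Notes on version B (the rewrite author's own statement) =====
-- stated objective: simpler
-- what changed: Replaces A's doubly nested per-word, per-character counting loop by joining each line's words into one string and computing len(s) - s.count(',') - s.count('.') arithmetically.
import Mathlib
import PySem

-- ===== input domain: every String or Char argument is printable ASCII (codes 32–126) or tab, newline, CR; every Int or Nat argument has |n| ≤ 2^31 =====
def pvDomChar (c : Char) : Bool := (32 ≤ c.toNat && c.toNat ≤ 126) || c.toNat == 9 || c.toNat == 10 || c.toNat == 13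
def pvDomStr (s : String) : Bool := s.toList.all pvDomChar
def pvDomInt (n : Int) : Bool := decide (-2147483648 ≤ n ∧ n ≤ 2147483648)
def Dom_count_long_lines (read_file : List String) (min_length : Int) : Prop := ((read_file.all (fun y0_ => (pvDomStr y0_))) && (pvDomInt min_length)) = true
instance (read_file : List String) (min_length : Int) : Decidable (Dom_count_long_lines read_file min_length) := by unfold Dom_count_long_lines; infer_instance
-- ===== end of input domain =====

-- B replaces A's doubly nested per-word, per-character counting loop by joining each
-- line's words and computing len(s) - s.count(',') - s.count('.') arithmetically (simpler).

-- ===== PORT A =====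
def count_long_lines (read_file : List String) (min_length : Int) : Int :=
  read_file.foldl (fun long_lines line =>
    let splited_line := PySem.Str.split₀ line
    let characters_in_line : Int :=
      (PySem.List.pyRange 0 (PySem.List.len splited_line)).foldl (fun acc n =>
        let word := PySem.List.pyGetD splited_line n ""
        -- word[i], index always in range; ported as pyGetD on the char list (Str.pyGet? is toList[i]?)
        (PySem.List.pyRange 0 (PySem.Str.len word)).foldl (fun acc2 i =>
          let c := PySem.List.pyGetD word.toList i ' '
          if ¬c = ',' ∧ ¬c = '.' then acc2 + 1 else acc2) acc) 0
    if characters_in_line ≥ min_length then long_lines + 1 else long_lines) 0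

-- ===== PORT B =====
def count_long_lines_alt (read_file : List String) (min_length : Int) : Int :=
  read_file.foldl (fun long_lines line =>
    let s := PySem.Str.join "" (PySem.Str.split₀ line)
    let characters_in_line : Int :=
      PySem.Str.len s - (PySem.Str.count s "," : Int) - (PySem.Str.count s "." : Int)
    if characters_in_line ≥ min_length then long_lines + 1 else long_lines) 0

-- ===== PRECONDITION & SPEC =====
def Spec_count_long_lines (read_file : List String) (min_length : Int) (out : Int) : Prop := out = count_long_lines_alt read_file min_length
instance (read_file : List String) (min_length : Int) (out : Int) : Decidable (Spec_count_long_lines read_file min_length out) := by unfold Spec_count_long_lines; infer_instance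

-- ===== CLAIM (what is proved, stated in full; the proofs are below) =====
def Claim_equal_count_long_lines : Prop := ∀ (read_file : List String) (min_length : Int), Dom_count_long_lines read_file min_length → Spec_count_long_lines read_file min_length (count_long_lines read_file min_length)

-- ===== LEMMAS AND PROOFS =====

-- single-character substring count is plain character count
theorem count_go_single (c : Char) : ∀ (l : List Char) (fuel acc : ℕ), l.length ≤ fuel → PySem.Chars.count.go [c] fuel l acc = acc + l.count c := by
  intro l
  induction l with
  | nil => intro fuel acc h; cases fuel <;> simp [PySem.Chars.count.go]
  | cons a t ih =>
    intro fuel acc h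
    cases fuel with
    | zero => simp at h
    | succ n =>
      have ht : t.length ≤ n := by simpa using h
      simp only [PySem.Chars.count.go]
      by_cases hc : c = a
      · subst hc
        have hp : List.isPrefixOf [c] (c :: t) = true := by simp [List.isPrefixOf]
        simp [hp, ih n (acc + 1) ht]
        omega
      · have hp : List.isPrefixOf [c] (a :: t) = false := by simp [List.isPrefixOf, hc]
        simp [hp, ih n acc ht, Ne.symm hc]

theorem count_single (s : String) (sub : String) (c : Char) (hc : sub.toList = [c]) : PySem.Str.count s sub = s.toList.count c := by
  rw [PySem.Str.count_eq, hc]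
  simp only [PySem.Chars.count, List.isEmpty_cons, if_false, Bool.false_eq_true]
  simpa using count_go_single c s.toList s.toList.length 0 le_rfl

theorem intercalate_nil (L : List (List Char)) : ([] : List Char).intercalate L = L.flatten := by
  induction L with
  | nil => simp [List.intercalate]
  | cons x t ih =>
    cases t with
    | nil => simp [List.intercalate]
    | cons y u =>
      simp only [List.intercalate, List.intersperse, List.flatten] at *
      simpa using ih

theorem countP_split (l : List Char) : l.countP (fun c => decide (¬c = ',' ∧ ¬c = '.')) + l.count ',' + l.count '.' = l.length := by
  induction l with
  | nil => simp
  | cons a t ih =>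
    by_cases h1 : a = ',' <;> by_cases h2 : a = '.' <;>
      simp [h1, h2] at ih ⊢ <;> omega

theorem line_count_eq (line : String) :
    (PySem.List.pyRange 0 (PySem.List.len (PySem.Str.split₀ line))).foldl (fun acc n =>
        (PySem.List.pyRange 0 (PySem.Str.len (PySem.List.pyGetD (PySem.Str.split₀ line) n ""))).foldl
          (fun acc2 i =>
            if ¬PySem.List.pyGetD (PySem.List.pyGetD (PySem.Str.split₀ line) n "").toList i ' ' = ',' ∧
               ¬PySem.List.pyGetD (PySem.List.pyGetD (PySem.Str.split₀ line) n "").toList i ' ' = '.'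
            then acc2 + 1 else acc2) acc) 0
    = PySem.Str.len (PySem.Str.join "" (PySem.Str.split₀ line))
      - (PySem.Str.count (PySem.Str.join "" (PySem.Str.split₀ line)) "," : Int)
      - (PySem.Str.count (PySem.Str.join "" (PySem.Str.split₀ line)) "." : Int) := by
  set words := PySem.Str.split₀ line with hw
  have hword : ∀ (w : String) (acc : Int),
      (PySem.List.pyRange 0 (PySem.Str.len w)).foldl (fun acc2 i =>
        if ¬PySem.List.pyGetD w.toList i ' ' = ',' ∧ ¬PySem.List.pyGetD w.toList i ' ' = '.'
        then acc2 + 1 else acc2) acc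
      = acc + (w.toList.countP (fun c => decide (¬c = ',' ∧ ¬c = '.')) : Int) := by
    intro w acc
    rw [PySem.Str.len_eq,
      PySem.List.foldl_pyRange_zero_pyGetD' w.toList ' '
        (fun acc2 c => if ¬c = ',' ∧ ¬c = '.' then acc2 + 1 else acc2) acc,
      PySem.List.foldl_ite_add_one]
  have houter :
      (PySem.List.pyRange 0 (PySem.List.len words)).foldl (fun acc n =>
        (PySem.List.pyRange 0 (PySem.Str.len (PySem.List.pyGetD words n ""))).foldl
          (fun acc2 i =>
            if ¬PySem.List.pyGetD (PySem.List.pyGetD words n "").toList i ' ' = ',' ∧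
               ¬PySem.List.pyGetD (PySem.List.pyGetD words n "").toList i ' ' = '.'
            then acc2 + 1 else acc2) acc) 0
      = (words.map (fun w => (w.toList.countP (fun c => decide (¬c = ',' ∧ ¬c = '.')) : Int))).sum := by
    rw [PySem.List.len_eq,
      PySem.List.foldl_pyRange_zero_pyGetD' words ""
        (fun acc w =>
          (PySem.List.pyRange 0 (PySem.Str.len w)).foldl (fun acc2 i =>
            if ¬PySem.List.pyGetD w.toList i ' ' = ',' ∧ ¬PySem.List.pyGetD w.toList i ' ' = '.'
            then acc2 + 1 else acc2) acc) 0]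
    have : (fun (acc : Int) (w : String) =>
        (PySem.List.pyRange 0 (PySem.Str.len w)).foldl (fun acc2 i =>
          if ¬PySem.List.pyGetD w.toList i ' ' = ',' ∧ ¬PySem.List.pyGetD w.toList i ' ' = '.'
          then acc2 + 1 else acc2) acc)
        = fun acc w => acc + (w.toList.countP (fun c => decide (¬c = ',' ∧ ¬c = '.')) : Int) := by
      funext acc w; exact hword w acc
    rw [this, PySem.List.foldl_add, zero_add]
  rw [houter]
  have hs : (PySem.Str.join "" words).toList = (words.map String.toList).flatten := by
    simp [PySem.Str.join, PySem.Chars.join, intercalate_nil]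
  rw [PySem.Str.len_eq, count_single _ "," ',' (by decide),
    count_single _ "." '.' (by decide), hs]
  have hsplit := countP_split (words.map String.toList).flatten
  have hcp : (words.map (fun w => (w.toList.countP (fun c => decide (¬c = ',' ∧ ¬c = '.')) : Int))).sum
      = ((words.map String.toList).flatten.countP (fun c => decide (¬c = ',' ∧ ¬c = '.')) : Int) := by
    rw [List.countP_flatten]
    push_cast
    rw [List.map_map]
    simp [Function.comp_def]
  rw [hcp]
  omega

theorem foldl_congr_fun {α β : Type} (f g : β → α → β) (h : ∀ b a, f b a = g b a) : ∀ (l : List α) (i : β), l.foldl f i = l.foldl g i := by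
  intro l
  induction l with
  | nil => intro i; rfl
  | cons x t ih => intro i; simp only [List.foldl_cons, h, ih]

-- ===== VERDICT (by name: the statement is the Claim_ definition above) =====
theorem count_long_lines_spec : Claim_equal_count_long_lines := by
  intro read_file min_length _
  show count_long_lines read_file min_length = count_long_lines_alt read_file min_length
  unfold count_long_lines count_long_lines_alt
  apply foldl_congr_fun
  intro long_lines line
  simp only [line_count_eq]
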